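-- pv_equiv track=rewrite | github.com/open-contracting/data-support | cli/schema_erd.py | _find_orphaned_types
-- ===== SOURCE A (Python) =====
-- from collections import defaultdict
--
-- def _find_orphaned_types(all_schemas, refs_from, excluded_types):
--     """Find schemas only referenced by excluded types (recursively)."""
--     # Build reverse reference map: schema -> set of schemas that reference it
--     referenced_by = defaultdict(set)
--     for name, refs in refs_from.items():
--         for ref in refs:
--             referenced_by[ref].add(name)
--
--     orphaned = set()
--
--     # Iteratively find orphans
--     while True:
--         new_orphans = set()
--         for name in all_schemas:
--             if name in excluded_types or name in orphaned:
--                 continue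
--             # Check if all references to this schema come from excluded/orphaned types
--             referrers = referenced_by.get(name, set())
--             if referrers and referrers <= (excluded_types | orphaned):
--                 new_orphans.add(name)
--
--         if not new_orphans:
--             break
--         orphaned |= new_orphans
--
--     return orphaned
-- ===== SOURCE B (Python) =====
-- def _find_orphaned_types(all_schemas, refs_from, excluded_types):
--     """Find schemas only referenced by excluded types (recursively).
--
--     Counting version: instead of re-testing ``referrers <= excluded | orphaned``
--     for every schema in every round, keep per-schema counts of still-active
--     (non-excluded, non-orphaned) referrers and decrement them as schemas are
--     orphaned; a schema is orphanable exactly when its count is zero."""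
--     referenced_by = {}
--     for name, refs in refs_from.items():
--         for ref in refs:
--             referenced_by.setdefault(ref, set()).add(name)
--     # active[n] = number of referrers of n that are neither excluded nor orphaned
--     active = {n: len(refs - excluded_types) for n, refs in referenced_by.items()}
--     candidates = list(dict.fromkeys(all_schemas))
--     orphaned = set()
--     while True:
--         frontier = [n for n in candidates
--                     if n not in excluded_types and n not in orphaned
--                     and n in active and active[n] == 0]
--         if not frontier:
--             return orphaned
--         for x in frontier:
--             orphaned.add(x)
--             for ref in set(refs_from.get(x, ())):
--                 active[ref] -= 1
-- ===== Notes on version B (the rewrite author's own statement) =====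
-- stated objective: faster
-- what changed: A rechecks every non-orphaned schema each round with a subset test against a freshly built excluded|orphaned union; B maintains a dict of active (non-excluded, non-orphaned) referrer counts, decrements them as schemas are orphaned, and orphans a schema exactly when its count reaches zero.
import Mathlib
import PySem

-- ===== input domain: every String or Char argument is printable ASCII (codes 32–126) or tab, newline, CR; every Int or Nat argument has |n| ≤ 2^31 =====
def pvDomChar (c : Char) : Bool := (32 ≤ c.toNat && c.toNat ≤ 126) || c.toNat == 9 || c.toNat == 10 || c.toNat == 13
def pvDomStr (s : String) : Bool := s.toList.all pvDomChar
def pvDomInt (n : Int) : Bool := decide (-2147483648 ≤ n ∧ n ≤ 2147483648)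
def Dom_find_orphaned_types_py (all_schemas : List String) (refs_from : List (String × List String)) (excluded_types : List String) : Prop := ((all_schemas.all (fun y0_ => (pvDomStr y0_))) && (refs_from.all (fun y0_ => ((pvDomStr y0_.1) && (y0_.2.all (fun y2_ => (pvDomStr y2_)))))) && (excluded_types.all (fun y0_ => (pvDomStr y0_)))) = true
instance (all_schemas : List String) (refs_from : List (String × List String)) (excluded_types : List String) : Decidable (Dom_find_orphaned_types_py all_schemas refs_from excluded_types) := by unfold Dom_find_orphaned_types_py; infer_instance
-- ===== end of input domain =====

-- B replaces A's per-round per-schema subset test 'referrers <= excluded | orphaned' (which rebuilds the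
-- union every time) by maintained counts of still-active referrers, decremented as schemas are orphaned;
-- measurably faster on layered inputs. Equivalence of the RETURN value is proved on refs_from with distinct keys.

-- ===== PORT A =====
-- for name, refs in refs_from.items(): for ref in refs: referenced_by[ref].add(name)   (defaultdict(set))
-- (Python B builds the same reverse map with setdefault; both ports share this helper)
def pvRb (refs_from : List (String × List String)) : PySem.Dict String (PySem.Set String) :=
  refs_from.foldl
    (fun d p => p.2.foldl (fun d ref => d.modify ref PySem.Set.empty (fun s => PySem.Set.add s p.1)) d)
    PySem.Dict.empty

-- one pass of A's 'for name in all_schemas' building new_orphans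
def pvRoundA (all_schemas excluded_types : List String)
    (rb : PySem.Dict String (PySem.Set String)) (orphaned : PySem.Set String) : PySem.Set String :=
  all_schemas.foldl
    (fun new name =>
      if PySem.Set.contains excluded_types name || PySem.Set.contains orphaned name then new
      else
        let referrers := rb.getD name PySem.Set.empty
        if (!referrers.isEmpty) &&
            PySem.Set.issubset referrers (PySem.Set.union excluded_types orphaned) then
          PySem.Set.add new name
        else new)
    PySem.Set.empty

-- A's 'while True' loop; the fuel all_schemas.length + 1 provably exceeds the number of iterations
-- (every iteration but the last adds at least one distinct schema of all_schemas to orphaned)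
def pvLoopA (all_schemas excluded_types : List String)
    (rb : PySem.Dict String (PySem.Set String)) : Nat → PySem.Set String → PySem.Set String
  | 0, orphaned => orphaned
  | fuel + 1, orphaned =>
    let new := pvRoundA all_schemas excluded_types rb orphaned
    if new.isEmpty then orphaned
    else pvLoopA all_schemas excluded_types rb fuel (PySem.Set.update orphaned new)

def find_orphaned_types_py (all_schemas : List String) (refs_from : List (String × List String))
    (excluded_types : List String) : List String :=
  pvLoopA all_schemas excluded_types (pvRb refs_from) (all_schemas.length + 1) PySem.Set.empty

-- ===== PORT B =====
-- active = {n: len(refs - excluded_types) for n, refs in referenced_by.items()}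
def pvActive0 (rb : PySem.Dict String (PySem.Set String)) (excluded_types : List String) :
    PySem.Dict String Int :=
  rb.items.foldl (fun a p => a.insert p.1 (PySem.Set.len (PySem.Set.diff p.2 excluded_types)))
    PySem.Dict.empty

-- [n for n in candidates if n not in excluded_types and n not in orphaned and n in active and active[n] == 0]
def pvFrontier (candidates excluded_types : List String) (active : PySem.Dict String Int)
    (orphaned : PySem.Set String) : List String :=
  candidates.filter (fun n =>
    !PySem.Set.contains excluded_types n && !PySem.Set.contains orphaned n &&
      active.contains n && (active.getD n 0 == 0))

-- for x in frontier: orphaned.add(x); for ref in set(refs_from.get(x, ())): active[ref] -= 1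
-- (active[ref] -= 1 is ported as modify with default 0; ref is always a key of active here)
def pvProc (refs_from : List (String × List String)) (frontier : List String)
    (orphaned : PySem.Set String) (active : PySem.Dict String Int) :
    PySem.Set String × PySem.Dict String Int :=
  frontier.foldl
    (fun s x =>
      (PySem.Set.add s.1 x,
       (PySem.Set.ofList ((PySem.Dict.mk refs_from).getD x [])).foldl
         (fun a ref => a.modify ref 0 (fun v => v - 1)) s.2))
    (orphaned, active)

-- B's 'while True' loop; same provably sufficient fuel as A's
def pvLoopB (candidates excluded_types : List String) (refs_from : List (String × List String)) :
    Nat → PySem.Dict String Int → PySem.Set String → List String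
  | 0, _, orphaned => orphaned
  | fuel + 1, active, orphaned =>
    let frontier := pvFrontier candidates excluded_types active orphaned
    if frontier.isEmpty then orphaned
    else
      let st := pvProc refs_from frontier orphaned active
      pvLoopB candidates excluded_types refs_from fuel st.2 st.1

def find_orphaned_types_py_alt (all_schemas : List String) (refs_from : List (String × List String))
    (excluded_types : List String) : List String :=
  pvLoopB (PySem.List.dedup all_schemas) excluded_types refs_from (all_schemas.length + 1)
    (pvActive0 (pvRb refs_from) excluded_types) PySem.Set.empty

-- ===== PRECONDITION & SPEC =====
-- Pre_ excludes refs_from association lists with duplicate keys: they do not encode any Python dict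
-- (Python keeps only the last value per key, while the association-list ports read every pair).
def Pre_find_orphaned_types_py (all_schemas : List String) (refs_from : List (String × List String)) (excluded_types : List String) : Prop :=
  (refs_from.map (·.1)).Nodup
instance (all_schemas : List String) (refs_from : List (String × List String)) (excluded_types : List String) : Decidable (Pre_find_orphaned_types_py all_schemas refs_from excluded_types) := by unfold Pre_find_orphaned_types_py; infer_instance

def pvWitness_find_orphaned_types_py : List String × (List (String × List String)) × List String :=
  (["a", "b", "c"], [("a", ["b"]), ("b", ["c"])], ["a"])

def Spec_find_orphaned_types_py (all_schemas : List String) (refs_from : List (String × List String)) (excluded_types : List String) (out : List String) : Prop := out = find_orphaned_types_py_alt all_schemas refs_from excluded_types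
instance (all_schemas : List String) (refs_from : List (String × List String)) (excluded_types : List String) (out : List String) : Decidable (Spec_find_orphaned_types_py all_schemas refs_from excluded_types out) := by unfold Spec_find_orphaned_types_py; infer_instance

-- ===== CLAIM (what is proved, stated in full; the proofs are below) =====
def Claim_equal_find_orphaned_types_py : Prop := ∀ (all_schemas : List String) (refs_from : List (String × List String)) (excluded_types : List String), Dom_find_orphaned_types_py all_schemas refs_from excluded_types → Pre_find_orphaned_types_py all_schemas refs_from excluded_types → Spec_find_orphaned_types_py all_schemas refs_from excluded_types (find_orphaned_types_py all_schemas refs_from excluded_types)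

-- ===== LEMMAS AND PROOFS =====

theorem pv_step_getD (refs' : List String) (name : String)
    (d : PySem.Dict String (PySem.Set String)) (n : String) :
    (refs'.foldl (fun d ref => d.modify ref PySem.Set.empty (fun s => PySem.Set.add s name)) d).getD
        n PySem.Set.empty =
      if n ∈ refs' then PySem.Set.add (d.getD n PySem.Set.empty) name
      else d.getD n PySem.Set.empty := by
  induction refs' generalizing d with
  | nil => simp
  | cons r rs ih =>
    simp only [List.foldl_cons, ih, PySem.Dict.getD_modify]
    by_cases hnr : n = r <;> by_cases hns : n ∈ rs <;>
      simp [hnr, hns, PySem.Set.add_of_mem, PySem.Set.mem_add]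

theorem pv_rb_mem (l : List (String × List String)) (d : PySem.Dict String (PySem.Set String))
    (x n : String) :
    x ∈ (l.foldl (fun d p => p.2.foldl
          (fun d ref => d.modify ref PySem.Set.empty (fun s => PySem.Set.add s p.1)) d) d).getD n
        PySem.Set.empty ↔
      x ∈ d.getD n PySem.Set.empty ∨ ∃ p ∈ l, x = p.1 ∧ n ∈ p.2 := by
  induction l generalizing d with
  | nil => simp
  | cons p ps ih =>
    simp only [List.foldl_cons, ih, pv_step_getD]
    by_cases hn : n ∈ p.2 <;> simp [hn, PySem.Set.mem_add] <;> tauto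

theorem pv_rb_nodup_val (l : List (String × List String))
    (d : PySem.Dict String (PySem.Set String)) (n : String)
    (h : (d.getD n PySem.Set.empty).Nodup) :
    ((l.foldl (fun d p => p.2.foldl
        (fun d ref => d.modify ref PySem.Set.empty (fun s => PySem.Set.add s p.1)) d) d).getD n
      PySem.Set.empty).Nodup := by
  induction l generalizing d with
  | nil => exact h
  | cons p ps ih =>
    refine ih _ ?_
    rw [pv_step_getD]
    split
    · exact PySem.Set.nodup_add _ _ h
    · exact h

theorem pv_rb_keys_nodup (refs_from : List (String × List String)) :
    (pvRb refs_from).keys.Nodup := by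
  unfold pvRb
  generalize hd : PySem.Dict.empty = d
  have h : d.keys.Nodup := by rw [← hd]; exact PySem.Dict.nodup_keys_empty
  clear hd
  induction refs_from generalizing d with
  | nil => exact h
  | cons p ps ih =>
    refine ih _ ?_
    rw [PySem.Dict.keys_foldl_modify_key p.2 (fun x => x) PySem.Set.empty
      (fun _ _ => fun s => PySem.Set.add s p.1) d]
    exact PySem.Set.nodup_update _ _ h

theorem pv_rb_mem' (refs_from : List (String × List String)) (x n : String) :
    x ∈ (pvRb refs_from).getD n PySem.Set.empty ↔ ∃ p ∈ refs_from, x = p.1 ∧ n ∈ p.2 := by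
  unfold pvRb
  rw [pv_rb_mem]
  simp [PySem.Dict.getD_empty]

theorem pv_rb_nodup (refs_from : List (String × List String)) (n : String) :
    ((pvRb refs_from).getD n PySem.Set.empty).Nodup := by
  unfold pvRb
  exact pv_rb_nodup_val _ _ _ (by simp [PySem.Dict.getD_empty])

theorem pv_add_ne_nil {s : PySem.Set String} {x : String} : PySem.Set.add s x ≠ [] := by
  rw [PySem.Set.add_eq_ite]
  split
  · rename_i h; exact List.ne_nil_of_mem h
  · simp

theorem pv_rb_contains_iff (refs_from : List (String × List String)) (n : String) :
    (pvRb refs_from).contains n = true ↔ (pvRb refs_from).getD n PySem.Set.empty ≠ [] := by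
  constructor
  · intro h
    unfold pvRb at *
    generalize hd : PySem.Dict.empty = d at *
    have hinv : ∀ m, d.contains m = true → d.getD m PySem.Set.empty ≠ [] := by
      rw [← hd]; intro m hm; simp [PySem.Dict.contains_empty] at hm
    clear hd
    induction refs_from generalizing d with
    | nil => exact hinv n h
    | cons p ps ih =>
      refine ih _ h ?_
      intro m hm
      rw [pv_step_getD]
      have hk : m ∈ (p.2.foldl (fun d ref =>
          d.modify ref PySem.Set.empty (fun s => PySem.Set.add s p.1)) d).keys := by
        exact (PySem.Dict.contains_iff_mem_keys _ _).mp hm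
      rw [PySem.Dict.keys_foldl_modify_key p.2 (fun x => x) PySem.Set.empty
        (fun _ _ => fun s => PySem.Set.add s p.1) d] at hk
      rw [PySem.Set.mem_update] at hk
      by_cases hmem : m ∈ p.2
      · simp [hmem, pv_add_ne_nil]
      · have : m ∈ d.keys := by simpa [hmem] using hk
        simp [hmem]
        exact hinv m ((PySem.Dict.contains_iff_mem_keys _ _).mpr this)
  · intro h
    by_contra hc
    rw [Bool.not_eq_true] at hc
    exact h (PySem.Dict.getD_of_not_contains _ _ hc)

theorem pv_dmk_mem (refs_from : List (String × List String))
    (hkeys : (refs_from.map (·.1)).Nodup) (x n : String) :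
    n ∈ (PySem.Dict.mk refs_from).getD x [] ↔ ∃ p ∈ refs_from, x = p.1 ∧ n ∈ p.2 := by
  induction refs_from with
  | nil => simp [PySem.Dict.getD_eq_get?_getD, PySem.Dict.get?]
  | cons q qs ih =>
    simp only [List.map_cons, List.nodup_cons] at hkeys
    obtain ⟨hq, hqs⟩ := hkeys
    rw [PySem.Dict.getD_eq_get?_getD]
    obtain ⟨k, v⟩ := q
    rw [PySem.Dict.get?_mk_cons]
    by_cases hkx : k = x
    · subst hkx
      simp only [BEq.rfl, if_true, Option.getD_some]
      constructor
      · intro hn; exact ⟨(k, v), by simp, rfl, hn⟩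
      · rintro ⟨p, hp, hxp, hnp⟩
        rcases List.mem_cons.mp hp with h | h
        · subst h; exact hnp
        · exfalso; exact hq (by simpa [← hxp] using List.mem_map_of_mem (f := (·.1)) h)
    · have : (k == x) = false := by simp [hkx]
      rw [this]
      simp only [Bool.false_eq_true, if_false, ← PySem.Dict.getD_eq_get?_getD]
      rw [ih hqs]
      constructor
      · rintro ⟨p, hp, h⟩; exact ⟨p, List.mem_cons_of_mem _ hp, h⟩
      · rintro ⟨p, hp, hxp, hnp⟩
        rcases List.mem_cons.mp hp with h | h
        · exfalso; apply hkx; rw [h] at hxp; exact hxp.symm ▸ rfl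
        · exact ⟨p, h, hxp, hnp⟩

theorem pv_active0_items (refs_from : List (String × List String)) (excl : List String) :
    (pvActive0 (pvRb refs_from) excl).items =
      (pvRb refs_from).items.map
        (fun p => (p.1, PySem.Set.len (PySem.Set.diff p.2 excl))) := by
  unfold pvActive0
  rw [PySem.Dict.items_foldl_insert_fresh (pvRb refs_from).items (·.1)
    (fun p => PySem.Set.len (PySem.Set.diff p.2 excl)) PySem.Dict.empty
    (by intro a _; exact PySem.Dict.contains_empty _)
    (pv_rb_keys_nodup refs_from)]
  simp
  rfl

theorem pv_active0_keys (refs_from : List (String × List String)) (excl : List String) :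
    (pvActive0 (pvRb refs_from) excl).keys = (pvRb refs_from).keys := by
  show ((pvActive0 (pvRb refs_from) excl).items.map (·.1)) = ((pvRb refs_from).items.map (·.1))
  rw [pv_active0_items]
  simp

theorem pv_active0_contains (refs_from : List (String × List String)) (excl : List String)
    (n : String) :
    (pvActive0 (pvRb refs_from) excl).contains n = (pvRb refs_from).contains n := by
  rw [Bool.eq_iff_iff, PySem.Dict.contains_iff_mem_keys, PySem.Dict.contains_iff_mem_keys,
    pv_active0_keys]

theorem pv_active0_getD (refs_from : List (String × List String)) (excl : List String) (n : String)
    (h : (pvRb refs_from).contains n = true) :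
    (pvActive0 (pvRb refs_from) excl).getD n 0 =
      ((((pvRb refs_from).getD n PySem.Set.empty).filter
        (fun r => !PySem.Set.contains excl r)).length : Int) := by
  have hsome : ∃ v, (pvRb refs_from).get? n = some v := by
    rw [PySem.Dict.contains_eq_isSome_get?] at h
    exact Option.isSome_iff_exists.mp h
  obtain ⟨v, hv⟩ := hsome
  have hmem : (n, v) ∈ (pvRb refs_from).items := PySem.Dict.mem_items_of_get?_eq_some _ hv
  have hgd : (pvRb refs_from).getD n PySem.Set.empty = v := by
    rw [PySem.Dict.getD_eq_get?_getD, hv]; rfl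
  have hmem2 : (n, PySem.Set.len (PySem.Set.diff v excl)) ∈ (pvActive0 (pvRb refs_from) excl).items := by
    rw [pv_active0_items]
    exact List.mem_map_of_mem hmem
  have hnd : (pvActive0 (pvRb refs_from) excl).keys.Nodup := by
    rw [pv_active0_keys]; exact pv_rb_keys_nodup refs_from
  rw [PySem.Dict.getD_of_mem_items _ hmem2 hnd, hgd]
  simp [PySem.Set.len, PySem.Set.diff, PySem.Set.contains_eq_listContains]

theorem pv_dec_getD (l : List String) (d : PySem.Dict String Int) (v : String) :
    (l.foldl (fun d x => d.modify x 0 (fun v => v - 1)) d).getD v 0 =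
      d.getD v 0 - (l.count v : Int) := by
  induction l generalizing d with
  | nil => simp
  | cons x xs ih =>
    rw [List.foldl_cons, ih, PySem.Dict.getD_modify]
    by_cases hv : v = x
    · simp [hv, List.count_cons_self]; ring
    · have : x ≠ v := fun h => hv h.symm
      simp [hv, List.count_cons_of_ne this]

theorem pv_dec_contains (l : List String) (d : PySem.Dict String Int) (n : String) :
    (l.foldl (fun d x => d.modify x 0 (fun v => v - 1)) d).contains n =
      (decide (n ∈ l) || d.contains n) := by
  induction l generalizing d with
  | nil => simp
  | cons x xs ih =>
    rw [List.foldl_cons, ih, PySem.Dict.contains_modify]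
    by_cases hn : n = x <;> by_cases hxs : n ∈ xs <;> simp [hn, hxs]

theorem pv_foldl_addIf (l : List String) (Q : String → Bool) (s : PySem.Set String) :
    l.foldl (fun s n => if Q n then PySem.Set.add s n else s) s =
      PySem.Set.update s (l.filter Q) := by
  show _ = (l.filter Q).foldl PySem.Set.add s
  rw [List.foldl_filter]

theorem pv_ofList_filter (l : List String) (Q : String → Bool) :
    PySem.Set.ofList (l.filter Q) = (PySem.Set.ofList l).filter Q := by
  induction l with
  | nil => simp
  | cons x xs ih =>
    rw [PySem.Set.ofList_cons]
    by_cases hx : Q x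
    · rw [List.filter_cons_of_pos hx, PySem.Set.ofList_cons, List.filter_cons_of_pos hx, ih]
      simp only [PySem.Set.discard, List.filter_filter]
      congr 1
      apply List.filter_congr
      intro a _
      rw [Bool.and_comm]
    · rw [List.filter_cons_of_neg hx, List.filter_cons_of_neg hx, ih]
      simp only [PySem.Set.discard, List.filter_filter]
      apply List.filter_congr
      intro a _
      by_cases hQ : Q a = true
      · have : a ≠ x := fun h => hx (h ▸ hQ)
        simp [hQ, this]
      · simp [hQ]

theorem pv_count_swap (l₁ l₂ : List String) (h₁ : l₁.Nodup) (h₂ : l₂.Nodup) :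
    l₁.countP (fun x => decide (x ∈ l₂)) = l₂.countP (fun x => decide (x ∈ l₁)) := by
  rw [List.countP_eq_length_filter, List.countP_eq_length_filter]
  apply List.Perm.length_eq
  apply (List.perm_ext_iff_of_nodup (h₁.filter _) (h₂.filter _)).mpr
  intro a
  simp only [List.mem_filter, decide_eq_true_eq]
  tauto

theorem pv_filter_split (rbn F : List String) (excl O : List String)
    (hF : ∀ r ∈ F, PySem.Set.contains excl r = false ∧ r ∉ O) :
    (rbn.filter (fun r => !(PySem.Set.contains excl r || decide (r ∈ O)))).length =
      (rbn.filter (fun r => !(PySem.Set.contains excl r || decide (r ∈ PySem.Set.update O F)))).length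
        + rbn.countP (fun r => decide (r ∈ F)) := by
  rw [← List.countP_eq_length_filter, ← List.countP_eq_length_filter]
  induction rbn with
  | nil => simp
  | cons r rs ih =>
    simp only [List.countP_cons]
    by_cases hrF : r ∈ F
    · obtain ⟨he, ho⟩ := hF r hrF
      have h1 : (!(PySem.Set.contains excl r || decide (r ∈ O))) = true := by
        rw [he]; simp [ho]
      have h2 : (!(PySem.Set.contains excl r || decide (r ∈ PySem.Set.update O F))) = false := by
        have : r ∈ PySem.Set.update O F := (PySem.Set.mem_update _ _ _).mpr (Or.inr hrF)
        simp [this]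
      rw [h1, h2]
      simp only [hrF, decide_true, if_true, if_false, Bool.false_eq_true]
      omega
    · have hup : (r ∈ PySem.Set.update O F) ↔ r ∈ O := by
        rw [PySem.Set.mem_update]; simp [hrF]
      have h2 : (!(PySem.Set.contains excl r || decide (r ∈ PySem.Set.update O F))) =
          (!(PySem.Set.contains excl r || decide (r ∈ O))) := by
        by_cases hro : r ∈ O
        · simp [hro, hup.mpr hro]
        · have : r ∉ PySem.Set.update O F := fun h => hro (hup.mp h)
          simp [hro, this]
      rw [h2]
      simp only [hrF, decide_false, if_false, Bool.false_eq_true]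
      omega

theorem pv_contains_decide (s : PySem.Set String) (x : String) :
    PySem.Set.contains s x = decide (x ∈ s) := by
  rw [Bool.eq_iff_iff]
  simp

-- membership duality between first-match lookup in refs_from and the reverse map
theorem pv_dmk_rb (refs_from : List (String × List String))
    (hkeys : (refs_from.map (·.1)).Nodup) (x n : String) :
    n ∈ (PySem.Dict.mk refs_from).getD x [] ↔ x ∈ (pvRb refs_from).getD n PySem.Set.empty := by
  rw [pv_dmk_mem refs_from hkeys, pv_rb_mem']

theorem pv_decAll_contains (refs_from : List (String × List String)) (F : List String)
    (a : PySem.Dict String Int)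
    (h : ∀ x ∈ F, ∀ m, m ∈ PySem.Set.ofList ((PySem.Dict.mk refs_from).getD x []) →
      a.contains m = true) (n : String) :
    (F.foldl (fun a x => (PySem.Set.ofList ((PySem.Dict.mk refs_from).getD x [])).foldl
        (fun a ref => a.modify ref 0 (fun v => v - 1)) a) a).contains n = a.contains n := by
  induction F generalizing a with
  | nil => rfl
  | cons x xs ih =>
    rw [List.foldl_cons]
    have hstep : ∀ m, ((PySem.Set.ofList ((PySem.Dict.mk refs_from).getD x [])).foldl
        (fun a ref => a.modify ref 0 (fun v => v - 1)) a).contains m = a.contains m := by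
      intro m
      rw [pv_dec_contains]
      by_cases hm : m ∈ PySem.Set.ofList ((PySem.Dict.mk refs_from).getD x [])
      · simp [hm, h x (by simp) m hm]
      · simp [hm]
    rw [ih _ (fun y hy m hm => by rw [hstep m]; exact h y (List.mem_cons_of_mem _ hy) m hm)]
    exact hstep n

theorem pv_decAll_getD (refs_from : List (String × List String)) (F : List String)
    (a : PySem.Dict String Int) (n : String) :
    (F.foldl (fun a x => (PySem.Set.ofList ((PySem.Dict.mk refs_from).getD x [])).foldl
        (fun a ref => a.modify ref 0 (fun v => v - 1)) a) a).getD n 0 =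
      a.getD n 0 - (F.countP (fun x => decide (n ∈ (PySem.Dict.mk refs_from).getD x [])) : Int) := by
  induction F generalizing a with
  | nil => simp
  | cons x xs ih =>
    rw [List.foldl_cons, ih, pv_dec_getD, List.countP_cons]
    by_cases hm : n ∈ (PySem.Dict.mk refs_from).getD x []
    · have hmem : n ∈ PySem.Set.ofList ((PySem.Dict.mk refs_from).getD x []) :=
        (PySem.Set.mem_ofList _ _).mpr hm
      rw [List.count_eq_one_of_mem (PySem.Set.nodup_ofList _) hmem]
      simp [hm]
      ring
    · have hmem : n ∉ PySem.Set.ofList ((PySem.Dict.mk refs_from).getD x []) :=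
        fun hc => hm ((PySem.Set.mem_ofList _ _).mp hc)
      rw [List.count_eq_zero.mpr hmem]
      simp [hm]

-- A's round written as a filter of the dedup'd schema list
theorem pv_roundA_eq (all_schemas excl : List String) (rb : PySem.Dict String (PySem.Set String))
    (O : PySem.Set String) :
    pvRoundA all_schemas excl rb O =
      PySem.Set.ofList (all_schemas.filter (fun name =>
        !(PySem.Set.contains excl name || PySem.Set.contains O name) &&
        (!(rb.getD name PySem.Set.empty).isEmpty &&
          PySem.Set.issubset (rb.getD name PySem.Set.empty) (PySem.Set.union excl O)))) := by
  unfold pvRoundA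
  have hbody : (fun (new : PySem.Set String) name =>
      if PySem.Set.contains excl name || PySem.Set.contains O name then new
      else
        let referrers := rb.getD name PySem.Set.empty
        if (!referrers.isEmpty) &&
            PySem.Set.issubset referrers (PySem.Set.union excl O) then
          PySem.Set.add new name
        else new) =
      (fun new name =>
        if (!(PySem.Set.contains excl name || PySem.Set.contains O name) &&
            (!(rb.getD name PySem.Set.empty).isEmpty &&
              PySem.Set.issubset (rb.getD name PySem.Set.empty) (PySem.Set.union excl O))) then
          PySem.Set.add new name
        else new) := by
    funext new name
    cases h1 : (PySem.Set.contains excl name || PySem.Set.contains O name) <;>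
      cases h2 : (!(rb.getD name PySem.Set.empty).isEmpty &&
        PySem.Set.issubset (rb.getD name PySem.Set.empty) (PySem.Set.union excl O)) <;>
      simp only [h1, h2, Bool.true_and, Bool.false_and, Bool.not_true, Bool.not_false,
        if_true, if_false, Bool.false_eq_true, Bool.true_eq_false, if_neg, ite_self] <;>
      simp
  rw [hbody, pv_foldl_addIf, PySem.Set.update_empty]

-- the two per-round tests agree under the counting invariant
theorem pv_pred_eq (refs_from : List (String × List String)) (excl : List String)
    (O : PySem.Set String) (active : PySem.Dict String Int)
    (hc : ∀ n, active.contains n = (pvRb refs_from).contains n)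
    (hv : ∀ n, (pvRb refs_from).contains n = true →
      active.getD n 0 = ((((pvRb refs_from).getD n PySem.Set.empty).filter
        (fun r => !(PySem.Set.contains excl r || PySem.Set.contains O r))).length : Int))
    (n : String) :
    (!PySem.Set.contains excl n && !PySem.Set.contains O n &&
        active.contains n && (active.getD n 0 == 0)) =
      (!(PySem.Set.contains excl n || PySem.Set.contains O n) &&
        (!((pvRb refs_from).getD n PySem.Set.empty).isEmpty &&
          PySem.Set.issubset ((pvRb refs_from).getD n PySem.Set.empty)
            (PySem.Set.union excl O))) := by
  cases he : PySem.Set.contains excl n with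
  | true => simp only [he, Bool.not_true, Bool.false_and, Bool.true_or]

  | false =>
  cases ho : PySem.Set.contains O n with
  | true =>
    simp only [he, ho, Bool.not_true, Bool.not_false, Bool.true_and, Bool.false_and,
      Bool.and_false, Bool.false_or, Bool.true_or]
  | false =>
  rw [hc]
  by_cases hrb : (pvRb refs_from).contains n = true
  · have hne : (pvRb refs_from).getD n PySem.Set.empty ≠ [] :=
      (pv_rb_contains_iff refs_from n).mp hrb
    have hie : ((pvRb refs_from).getD n PySem.Set.empty).isEmpty = false := by
      rw [List.isEmpty_eq_false_iff]; exact hne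
    have hsub : (active.getD n 0 == 0) =
        PySem.Set.issubset ((pvRb refs_from).getD n PySem.Set.empty)
          (PySem.Set.union excl O) := by
      rw [hv n hrb, Bool.eq_iff_iff, PySem.Set.issubset_iff]
      simp only [beq_iff_eq, Int.natCast_eq_zero, List.length_eq_zero_iff,
        List.filter_eq_nil_iff]
      constructor
      · intro h x hx
        have h2 := h x hx
        rw [PySem.Set.mem_union]
        simp only [pv_contains_decide] at h2
        by_cases hxe : x ∈ excl
        · exact Or.inl hxe
        · right
          simp [hxe] at h2
          exact h2
      · intro h x hx
        have h2 := (PySem.Set.mem_union _ _ _).mp (h x hx)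
        simp only [pv_contains_decide]
        rcases h2 with h2 | h2 <;> simp [h2]
    rw [hsub]
    simp only [he, ho, hrb, hie, Bool.not_false, Bool.true_and, Bool.false_or, Bool.or_self,
      Bool.and_true]
  · have hfalse : (pvRb refs_from).contains n = false := by
      rw [Bool.not_eq_true] at hrb; exact hrb
    have hgd : (pvRb refs_from).getD n PySem.Set.empty = [] :=
      PySem.Dict.getD_of_not_contains _ _ hfalse
    simp only [he, ho, hfalse, hgd, List.isEmpty_nil, Bool.not_true, Bool.not_false,
      Bool.true_and, Bool.false_and, Bool.and_false, Bool.false_or, Bool.or_self]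

theorem pv_loop_eq (all_schemas excl : List String) (refs_from : List (String × List String))
    (hkeys : (refs_from.map (·.1)).Nodup) :
    ∀ (fuel : Nat) (active : PySem.Dict String Int) (O : PySem.Set String),
      O.Nodup →
      (∀ x ∈ O, PySem.Set.contains excl x = false) →
      (∀ n, active.contains n = (pvRb refs_from).contains n) →
      (∀ n, (pvRb refs_from).contains n = true →
        active.getD n 0 = ((((pvRb refs_from).getD n PySem.Set.empty).filter
          (fun r => !(PySem.Set.contains excl r || PySem.Set.contains O r))).length : Int)) →
      pvLoopA all_schemas excl (pvRb refs_from) fuel O =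
        pvLoopB (PySem.List.dedup all_schemas) excl refs_from fuel active O := by
  intro fuel
  induction fuel with
  | zero => intro active O _ _ _ _; rfl
  | succ fuel ih =>
    intro active O hO hOe hc hv
    -- the frontier of B equals the new_orphans of A, as lists
    have hfe : pvFrontier (PySem.List.dedup all_schemas) excl active O =
        pvRoundA all_schemas excl (pvRb refs_from) O := by
      rw [pv_roundA_eq, pv_ofList_filter]
      unfold pvFrontier
      rw [PySem.List.dedup_eq_ofList]
      apply List.filter_congr
      intro n _
      exact pv_pred_eq refs_from excl O active hc hv n
    show (let new := pvRoundA all_schemas excl (pvRb refs_from) O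
      if new.isEmpty then O
      else pvLoopA all_schemas excl (pvRb refs_from) fuel (PySem.Set.update O new)) =
      (let frontier := pvFrontier (PySem.List.dedup all_schemas) excl active O
       if frontier.isEmpty then O
       else
         let st := pvProc refs_from frontier O active
         pvLoopB (PySem.List.dedup all_schemas) excl refs_from fuel st.2 st.1)
    simp only [hfe]
    by_cases hempty : (pvRoundA all_schemas excl (pvRb refs_from) O).isEmpty = true
    · simp [hempty]
    · rw [if_neg hempty, if_neg hempty]
      set F := pvRoundA all_schemas excl (pvRb refs_from) O with hF
      -- split the pair fold of B
      have hproc : pvProc refs_from F O active =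
          (PySem.Set.update O F,
           F.foldl (fun a x => (PySem.Set.ofList ((PySem.Dict.mk refs_from).getD x [])).foldl
             (fun a ref => a.modify ref 0 (fun v => v - 1)) a) active) := by
        unfold pvProc
        rw [PySem.List.foldl_prod_mk (fun s x => PySem.Set.add s x)
          (fun a x => (PySem.Set.ofList ((PySem.Dict.mk refs_from).getD x [])).foldl
            (fun a ref => a.modify ref 0 (fun v => v - 1)) a) F O active]
        rfl
      rw [hproc]
      -- facts about the frontier
      have hFmem : ∀ r ∈ F, PySem.Set.contains excl r = false ∧ r ∉ O ∧
          (pvRb refs_from).contains r = true := by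
        intro r hr
        rw [← hfe] at hr
        unfold pvFrontier at hr
        have := List.of_mem_filter hr
        simp only [Bool.and_eq_true, Bool.not_eq_true'] at this
        refine ⟨this.1.1.1, ?_, by rw [← hc]; exact this.1.2⟩
        intro hrO
        have := this.1.1.2
        rw [pv_contains_decide] at this
        simp [hrO] at this
      have hFnodup : F.Nodup := by
        rw [← hfe]
        unfold pvFrontier
        rw [PySem.List.dedup_eq_ofList]
        exact (PySem.Set.nodup_ofList _).filter _
      exact ih _ _ (PySem.Set.nodup_update _ _ hO)
        (by
          intro x hx
          rcases (PySem.Set.mem_update _ _ _).mp hx with h | h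
          · exact hOe x h
          · exact (hFmem x h).1)
        (by
          intro n
          rw [pv_decAll_contains refs_from F active
            (by
              intro x _ m hm
              rw [PySem.Set.mem_ofList] at hm
              have hmem : x ∈ (pvRb refs_from).getD m PySem.Set.empty :=
                (pv_dmk_rb refs_from hkeys x m).mp hm
              have : (pvRb refs_from).contains m = true :=
                (pv_rb_contains_iff refs_from m).mpr (List.ne_nil_of_mem hmem)
              rw [hc]; exact this) n]
          exact hc n)
        (by
          intro n hrb
          rw [pv_decAll_getD, hv n hrb]
          have hcnt : F.countP (fun x => decide (n ∈ (PySem.Dict.mk refs_from).getD x [])) =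
              F.countP (fun x => decide (x ∈ (pvRb refs_from).getD n PySem.Set.empty)) := by
            apply List.countP_congr
            intro x _
            have h := pv_dmk_rb refs_from hkeys x n
            by_cases hx : n ∈ (PySem.Dict.mk refs_from).getD x []
            · have hx2 : x ∈ (pvRb refs_from).getD n PySem.Set.empty := h.mp hx
              simp only [hx, hx2, decide_true]
            · have hx2 : x ∉ (pvRb refs_from).getD n PySem.Set.empty := fun hc => hx (h.mpr hc)
              simp only [hx, hx2, decide_false]
          rw [hcnt, pv_count_swap F _ hFnodup (pv_rb_nodup refs_from n)]
          have hsplit := pv_filter_split ((pvRb refs_from).getD n PySem.Set.empty) F excl O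
            (fun r hr => ⟨(hFmem r hr).1, (hFmem r hr).2.1⟩)
          have hrw : ∀ r, (PySem.Set.contains excl r || decide (r ∈ O)) =
              (PySem.Set.contains excl r || PySem.Set.contains O r) := by
            intro r; rw [pv_contains_decide O r]
          have hrw2 : ∀ r, (PySem.Set.contains excl r || decide (r ∈ PySem.Set.update O F)) =
              (PySem.Set.contains excl r || PySem.Set.contains (PySem.Set.update O F) r) := by
            intro r; rw [pv_contains_decide (PySem.Set.update O F) r]
          simp only [hrw, hrw2] at hsplit
          rw [hsplit]
          push_cast
          ring)

-- ===== VERDICT (by name: the statement is the Claim_ definition above) =====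
theorem find_orphaned_types_py_spec : Claim_equal_find_orphaned_types_py := by
  intro all_schemas refs_from excluded_types _hdom hpre
  unfold Spec_find_orphaned_types_py find_orphaned_types_py find_orphaned_types_py_alt
  apply pv_loop_eq all_schemas excluded_types refs_from hpre (all_schemas.length + 1)
    (pvActive0 (pvRb refs_from) excluded_types) PySem.Set.empty List.nodup_nil
    (by intro x hx; simp [PySem.Set.empty] at hx)
    (pv_active0_contains refs_from excluded_types)
    (by
      intro n h
      have heq : ((pvRb refs_from).getD n PySem.Set.empty).filter
            (fun r => !(PySem.Set.contains excluded_types r ||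
              PySem.Set.contains PySem.Set.empty r)) =
          ((pvRb refs_from).getD n PySem.Set.empty).filter
            (fun r => !PySem.Set.contains excluded_types r) := by
        apply List.filter_congr
        intro r _
        have h0 : PySem.Set.contains (PySem.Set.empty : PySem.Set String) r = false := rfl
        rw [h0, Bool.or_false]
      rw [heq, pv_active0_getD refs_from excluded_types n h])
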